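-- pv_equiv track=rewrite | github.com/ramsay-t/Athena | athena/deps/intra.py | get_substring_matches
-- ===== SOURCE A (Python) =====
-- def get_substring_matches(s1,s2):
--     if len(s1) != len(s2):
--         raise Exception("get_substring_matches is only defined for identical length strings")
--     else:
--         results = []
--         current = ("",-1)
--         for i in range(0,len(s1)):
--             if s1[i] == s2[i]:
--                 if current[1] == -1:
--                     current = (s1[i],i)
--                 else:
--                     current = (current[0]+s1[i],current[1])
--             else:
--                 if current[1] != -1:
--                     # Currently discards single item matches...
--                     if len(current[0]) > 1:
--                         results.append(current)
--                     current = ("",-1)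
--         if current[1] != -1:
--             if len(current[0]) > 1:
--                 results.append(current)
--         return results
-- ===== SOURCE B (Python) =====
-- def get_substring_matches(s1, s2):
--     if len(s1) != len(s2):
--         raise Exception("get_substring_matches is only defined for identical length strings")
--     results = []
--     n = len(s1)
--     i = 0
--     while i < n:
--         if s1[i] == s2[i]:
--             j = i
--             while j < n and s1[j] == s2[j]:
--                 j += 1
--             if j - i > 1:
--                 results.append((s1[i:j], i))
--             i = j
--         else:
--             i += 1
--     return results
-- ===== Notes on version B (the rewrite author's own statement) =====
-- stated objective: simpler
-- what changed: Replaced A's running (string,-1) accumulator/sentinel state machine with direct run-scanning: a two-pointer loop finds each maximal run of equal positions and slices it out of s1, with no carried state and no end-of-loop flush.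
import Mathlib
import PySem

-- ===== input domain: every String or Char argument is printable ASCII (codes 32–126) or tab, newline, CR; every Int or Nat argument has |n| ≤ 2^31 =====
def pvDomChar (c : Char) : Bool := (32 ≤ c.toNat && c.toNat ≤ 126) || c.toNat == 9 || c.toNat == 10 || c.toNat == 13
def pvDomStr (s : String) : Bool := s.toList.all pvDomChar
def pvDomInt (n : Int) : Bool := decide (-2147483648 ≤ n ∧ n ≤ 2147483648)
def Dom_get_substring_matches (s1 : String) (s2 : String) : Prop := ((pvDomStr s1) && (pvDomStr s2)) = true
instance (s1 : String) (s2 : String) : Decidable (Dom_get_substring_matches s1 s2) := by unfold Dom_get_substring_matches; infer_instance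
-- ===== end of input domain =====

-- B replaces A's running (string, -1) accumulator/sentinel state machine with direct
-- two-pointer run-scanning (find each maximal equal run, slice it out): simpler, same cost.


-- ===== PORT A =====
-- indices for the 'for i in range(0,len(s1))' loop; since lengths are equal (Pre_),
-- iterating i and reading s1[i], s2[i] is iterating the indexed zip of the two char lists
def pvEnumFrom (i : Int) : List (Char × Char) → List (Int × Char × Char)
  | [] => []
  | x :: t => (i, x) :: pvEnumFrom (i + 1) t

-- one iteration of A's loop body; `current` is (chars so far, start index), -1 the sentinel
def pvAStep (st : List (String × Int) × (List Char × Int)) (p : Int × Char × Char) :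
    List (String × Int) × (List Char × Int) :=
  match st, p with
  | (results, (cur, ci)), (i, a, b) =>
    if a = b then
      if ci = -1 then (results, ([a], i))
      else (results, (cur ++ [a], ci))
    else
      if ci ≠ -1 then
        ((if cur.length > 1 then results ++ [(String.mk cur, ci)] else results), ([], -1))
      else (results, (cur, ci))

def get_substring_matches (s1 : String) (s2 : String) : List (String × Int) :=
  if s1.toList.length ≠ s2.toList.length then []   -- Python raises here; excluded by Pre_
  else
    match (pvEnumFrom 0 (s1.toList.zip s2.toList)).foldl pvAStep ([], ([], -1)) with
    | (results, (cur, ci)) =>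
      if ci ≠ -1 then
        if cur.length > 1 then results ++ [(String.mk cur, ci)] else results
      else results

-- ===== PORT B =====
-- the inner `while j < n and s1[j] == s2[j]` scan: the leading equal run and the remainder
def pvRunSplit : List (Char × Char) → List Char × List (Char × Char)
  | [] => ([], [])
  | (a, b) :: t =>
    if a = b then
      let (r, rest) := pvRunSplit t
      (a :: r, rest)
    else ([], (a, b) :: t)

theorem pvRunSplit_len (l : List (Char × Char)) : (pvRunSplit l).2.length ≤ l.length := by
  induction l with
  | nil => simp [pvRunSplit]
  | cons x t ih =>
    obtain ⟨a, b⟩ := x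
    by_cases h : a = b <;> simp [pvRunSplit, h] <;> omega

-- the outer `while i < n` loop of B: at an equal position take the whole run, else advance
def pvBGo : List (Char × Char) → Int → List (String × Int)
  | [], _ => []
  | (a, b) :: t, i =>
    if a = b then
      if 1 + (pvRunSplit t).1.length > 1 then
        (String.mk (a :: (pvRunSplit t).1), i) :: pvBGo (pvRunSplit t).2 (i + 1 + (pvRunSplit t).1.length)
      else pvBGo (pvRunSplit t).2 (i + 1 + (pvRunSplit t).1.length)
    else pvBGo t (i + 1)
  termination_by l => l.length
  decreasing_by
    · have := pvRunSplit_len t; simp; omega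
    · have := pvRunSplit_len t; simp; omega
    · simp

def get_substring_matches_alt (s1 : String) (s2 : String) : List (String × Int) :=
  if s1.toList.length ≠ s2.toList.length then []   -- Python raises here; excluded by Pre_
  else pvBGo (s1.toList.zip s2.toList) 0

-- ===== PRECONDITION & SPEC =====
-- A raises Exception when the lengths differ; Pre_ excludes exactly those inputs.
def Pre_get_substring_matches (s1 : String) (s2 : String) : Prop :=
  s1.toList.length = s2.toList.length
instance (s1 : String) (s2 : String) : Decidable (Pre_get_substring_matches s1 s2) := by
  unfold Pre_get_substring_matches; infer_instance
def pvWitness_get_substring_matches : String × String := ("abcxabd", "abdxaby")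

def Spec_get_substring_matches (s1 : String) (s2 : String) (out : List (String × Int)) : Prop := out = get_substring_matches_alt s1 s2
instance (s1 : String) (s2 : String) (out : List (String × Int)) : Decidable (Spec_get_substring_matches s1 s2 out) := by unfold Spec_get_substring_matches; infer_instance

-- ===== CLAIM (what is proved, stated in full; the proofs are below) =====
def Claim_equal_get_substring_matches : Prop := ∀ (s1 : String) (s2 : String), Dom_get_substring_matches s1 s2 → Pre_get_substring_matches s1 s2 → Spec_get_substring_matches s1 s2 (get_substring_matches s1 s2)

-- ===== LEMMAS AND PROOFS =====

-- A's end-of-loop flush applied to a loop state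
def pvFlush (st : List (String × Int) × (List Char × Int)) : List (String × Int) :=
  match st with
  | (results, (cur, ci)) =>
    if ci ≠ -1 then
      if cur.length > 1 then results ++ [(String.mk cur, ci)] else results
    else results

-- Combined invariant: from the sentinel state A's loop produces pvBGo; from a mid-run
-- state (ci ≠ -1) it first finishes the current run, exactly as pvBGo's run step does.
theorem pvLoop_inv (n : Nat) :
    ∀ l : List (Char × Char), l.length = n →
      (∀ (i : Int) (res : List (String × Int)), 0 ≤ i →
        pvFlush ((pvEnumFrom i l).foldl pvAStep (res, ([], -1))) = res ++ pvBGo l i) ∧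
      (∀ (i j : Int) (res : List (String × Int)) (cur : List Char), 0 ≤ i → j ≠ -1 →
        pvFlush ((pvEnumFrom i l).foldl pvAStep (res, (cur, j))) =
          res ++ (if (cur ++ (pvRunSplit l).1).length > 1
                    then [(String.mk (cur ++ (pvRunSplit l).1), j)] else [])
              ++ pvBGo (pvRunSplit l).2 (i + (pvRunSplit l).1.length)) := by
  induction n using Nat.strong_induction_on with
  | _ n ih =>
    intro l hl
    constructor
    · intro i res hi
      cases l with
      | nil => simp [pvEnumFrom, pvFlush, pvBGo]
      | cons x t =>
        obtain ⟨a, b⟩ := x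
        by_cases hab : a = b
        · subst hab
          have hij : (i : Int) ≠ -1 := by omega
          simp only [pvEnumFrom, List.foldl_cons, pvAStep, reduceIte]
          rw [(ih t.length (by simp [← hl]) t rfl).2 (i + 1) i res [a] (by omega) hij]
          conv_rhs => rw [pvBGo.eq_def]
          simp only [reduceIte, List.singleton_append, List.length_cons, List.nil_append,
            List.append_assoc, List.cons_append]
          split_ifs with h1 h2 <;> first | rfl | omega | simp | (exfalso; omega)
        · simp only [pvEnumFrom, List.foldl_cons, pvAStep, if_neg hab, reduceIte]
          rw [if_neg (by simp)]
          rw [(ih t.length (by simp [← hl]) t rfl).1 (i + 1) res (by omega)]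
          simp [pvBGo, hab]
    · intro i j res cur hi hj
      cases l with
      | nil =>
        simp only [pvEnumFrom, List.foldl_nil, pvFlush, pvRunSplit, List.append_nil,
          List.length_nil, pvBGo, Int.natCast_zero, add_zero, if_pos hj]
        by_cases hc : cur.length > 1 <;> simp [hc]
      | cons x t =>
        obtain ⟨a, b⟩ := x
        by_cases hab : a = b
        · subst hab
          simp only [pvEnumFrom, List.foldl_cons, pvAStep, reduceIte, if_neg hj]
          rw [(ih t.length (by simp [← hl]) t rfl).2 (i + 1) j res (cur ++ [a]) (by omega) hj]
          simp only [pvRunSplit, reduceIte]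
          cases hsplit : pvRunSplit t with
          | mk r rest =>
            simp only [hsplit, List.append_assoc, List.singleton_append, List.length_cons]
            congr 2
            push_cast; ring
        · simp only [pvEnumFrom, List.foldl_cons, pvAStep, if_neg hab, if_pos hj, reduceIte]
          rw [(ih t.length (by simp [← hl]) t rfl).1 (i + 1)
            (if cur.length > 1 then res ++ [(String.mk cur, j)] else res) (by omega)]
          simp only [pvRunSplit, if_neg hab, List.length_nil, Int.natCast_zero,
            add_zero, List.append_nil]
          conv_rhs => rw [pvBGo.eq_def]
          simp only [if_neg hab]
          by_cases hc : cur.length > 1 <;> simp [hc]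

-- ===== VERDICT (by name: the statement is the Claim_ definition above) =====
theorem get_substring_matches_spec : Claim_equal_get_substring_matches := by
  intro s1 s2 _ hpre
  unfold Spec_get_substring_matches get_substring_matches get_substring_matches_alt
  rw [if_neg (by exact fun h => h hpre), if_neg (by exact fun h => h hpre)]
  have h := (pvLoop_inv (s1.toList.zip s2.toList).length (s1.toList.zip s2.toList) rfl).1
    0 [] le_rfl
  simpa [pvFlush] using h
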